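-- pv_equiv track=rewrite | github.com/Jungho-Cheon/algorithm-python | programmers/kakao2020_1.py | solution
-- ===== SOURCE A (Python) =====
-- def solution(s):
--     if len(s) == 1:
--         return 1
--     answer = 1000
--     ret = ""
--     for l in range(1, len(s)//2+1):
--         pattern = s[:l]
--         tmp = ""
--
--         cnt = 1
--         idx = 0
--
--         while True:
--             if pattern == s[idx + l:idx + l * 2]:
--                 cnt += 1
--                 idx += l
--
--             else:
--                 if cnt > 1:
--                     tmp += pattern
--                     tmp += str(cnt)
--                 else:
--                     tmp += s[idx:idx+l]
--                 idx += l
--                 pattern = s[idx:idx+l]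
--                 cnt = 1
--
--             if idx + l > len(s):
--                 tmp += pattern
--                 if cnt > 1:
--                     tmp += str(cnt)
--                 break
--
--         if answer > len(tmp):
--             answer = len(tmp)
--             ret = tmp
--
--     return answer, ret
-- ===== SOURCE B (Python) =====
-- def solution(s):
--     if len(s) == 1:
--         return 1
--     n = len(s)
--     best, ret = 1000, ""
--     for l in range(1, n // 2 + 1):
--         m = (n + l - 1) // l  # number of width-l chunks
--         # chunk j starts a new run unless it is full width and matches the
--         # previous chunk character-by-character at lag l
--         bounds = [j for j in range(m)
--                   if j == 0 or j * l + l > n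
--                   or any(s[i] != s[i - l] for i in range(j * l, j * l + l))]
--         bounds.append(m)
--         tmp = "".join(s[a * l:a * l + l] + (str(b - a) if b - a > 1 else "")
--                       for a, b in zip(bounds, bounds[1:]))
--         if len(tmp) < best:
--             best, ret = len(tmp), tmp
--     return best, ret
-- ===== Notes on version B (the rewrite author's own statement) =====
-- stated objective: alternative
-- what changed: For each width B detects run boundaries by character comparisons at lag l (never comparing or materialising chunk strings), collects the boundary chunk indices in one filtered list, and emits each run from consecutive boundary-index differences, instead of A's pattern/idx/cnt while-loop over string slices.
-- outside the precondition, e.g. on solution('a'): A returns 1, B returns 1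
import Mathlib
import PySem

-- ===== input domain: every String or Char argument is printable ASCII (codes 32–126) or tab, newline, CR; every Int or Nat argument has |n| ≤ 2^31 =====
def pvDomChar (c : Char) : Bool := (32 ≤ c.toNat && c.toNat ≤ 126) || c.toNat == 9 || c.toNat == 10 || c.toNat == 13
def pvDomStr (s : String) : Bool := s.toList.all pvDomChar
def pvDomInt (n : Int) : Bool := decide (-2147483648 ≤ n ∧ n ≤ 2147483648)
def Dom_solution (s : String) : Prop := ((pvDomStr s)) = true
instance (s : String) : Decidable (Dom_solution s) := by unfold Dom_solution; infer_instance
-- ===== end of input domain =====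

-- B finds run boundaries by character comparisons at lag l (no chunk-string comparisons), collects
-- the boundary indices in one filtered list and emits runs from consecutive boundary differences,
-- replacing A's pattern/idx/cnt while-loop over string slices (objective: alternative, same cost).

-- ===== PORT A =====
-- A's inner `while True` loop, step for step.  State: pattern, tmp, cnt, idx as in the Python;
-- the chunk width is l = k+1 (the caller passes k = l-1: l ≥ 1 always holds in A since l ranges
-- over range(1, len(s)//2+1); the +1 encoding is only a termination device).  The Python computes
-- the branch and then tests the single break condition `idx + l > len(s)` on the updated state;
-- here that test is transcribed once inside each of the two branches (same steps, same values).
def aLoop (cs : List Char) (k : Nat) (pattern tmp : List Char) (cnt : Int) (idx : Nat) : List Char :=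
  if pattern = PySem.List.slice cs (some ((idx + (k+1) : Nat) : Int)) (some ((idx + (k+1) + (k+1) : Nat) : Int)) then
    -- cnt += 1; idx += l; then `if idx + l > len(s)` on the new state
    if idx + (k+1) + (k+1) > cs.length then
      tmp ++ pattern ++ (if cnt + 1 > 1 then PySem.Int.toChars (cnt + 1) else [])
    else
      aLoop cs k pattern tmp (cnt + 1) (idx + (k+1))
  else
    -- tmp += pattern + str(cnt) (or s[idx:idx+l]); idx += l; pattern = s[idx:idx+l]; cnt = 1
    let tmp' := if cnt > 1 then tmp ++ pattern ++ PySem.Int.toChars cnt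
                else tmp ++ PySem.List.slice cs (some ((idx : Nat) : Int)) (some ((idx + (k+1) : Nat) : Int))
    let pattern' := PySem.List.slice cs (some ((idx + (k+1) : Nat) : Int)) (some ((idx + (k+1) + (k+1) : Nat) : Int))
    if idx + (k+1) + (k+1) > cs.length then
      tmp' ++ pattern' ++ (if (1 : Int) > 1 then PySem.Int.toChars 1 else [])
    else
      aLoop cs k pattern' tmp' 1 (idx + (k+1))
termination_by cs.length - idx
decreasing_by all_goals omega

-- On a length-1 string the Python returns the bare int 1 (not a pair); that input is outside
-- Pre_solution and the port returns a placeholder pair there.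
def solution (s : String) : Int × String :=
  let cs := s.toList
  if cs.length = 1 then (1, "")
  else
    let res := (PySem.List.pyRange 1 (PySem.Int.floordiv (cs.length : Int) 2 + 1) 1).foldl
      (fun (acc : Int × List Char) l =>
        let tmp := aLoop cs (l.toNat - 1) (PySem.List.slice cs none (some l)) [] 1 0
        if acc.1 > (tmp.length : Int) then ((tmp.length : Int), tmp) else acc)
      (1000, [])
    (res.1, String.ofList res.2)

-- ===== PORT B =====
-- `j == 0 or j*l + l > n or any(s[i] != s[i - l] for i in range(j*l, j*l + l))`
def bFlag (cs : List Char) (n l j : Int) : Bool :=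
  j == 0 || decide (j * l + l > n) ||
    (PySem.List.pyRange (j * l) (j * l + l) 1).any
      (fun i => decide (PySem.List.pyGet? cs i ≠ PySem.List.pyGet? cs (i - l)))

-- one joined piece: `s[a*l:a*l+l] + (str(b-a) if b-a > 1 else "")`
def bPiece (cs : List Char) (l : Int) (ab : Int × Int) : List Char :=
  PySem.List.slice cs (some (ab.1 * l)) (some (ab.1 * l + l)) ++
    (if ab.2 - ab.1 > 1 then PySem.Int.toChars (ab.2 - ab.1) else [])

-- `"".join(piece for a, b in zip(bounds2, bounds2[1:]))`
def bJoin (cs : List Char) (l : Int) (bl : List Int) : List Char :=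
  ((bl.zip (bl.drop 1)).map (bPiece cs l)).flatten

-- the candidate string for one width l
def bTmp (cs : List Char) (n l : Int) : List Char :=
  let m := PySem.Int.floordiv (n + l - 1) l
  let bounds := (PySem.List.pyRange 0 m 1).filter (fun j => bFlag cs n l j)
  bJoin cs l (bounds ++ [m])

def solution_alt (s : String) : Int × String :=
  let cs := s.toList
  if cs.length = 1 then (1, "")
  else
    let n : Int := (cs.length : Int)
    let res := (PySem.List.pyRange 1 (PySem.Int.floordiv n 2 + 1) 1).foldl
      (fun (acc : Int × List Char) l =>
        let tmp := bTmp cs n l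
        if (tmp.length : Int) < acc.1 then ((tmp.length : Int), tmp) else acc)
      (1000, [])
    (res.1, String.ofList res.2)

-- ===== PRECONDITION & SPEC =====
-- Pre_ excludes only length-1 strings: there the Python A returns the bare int 1, which is
-- not a value of the declared (int, str) pair type.
def Pre_solution (s : String) : Prop := s.toList.length ≠ 1
instance (s : String) : Decidable (Pre_solution s) := by unfold Pre_solution; infer_instance

def pvWitness_solution : String := "aabbaccc"

def Spec_solution (s : String) (out : Int × String) : Prop := out = solution_alt s
instance (s : String) (out : Int × String) : Decidable (Spec_solution s out) := by unfold Spec_solution; infer_instance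

-- ===== CLAIM (what is proved, stated in full; the proofs are below) =====
def Claim_equal_solution : Prop := ∀ (s : String), Dom_solution s → Pre_solution s → Spec_solution s (solution s)

-- ===== LEMMAS AND PROOFS =====

-- the chunk decomposition s[idx:idx+l], s[idx+l:idx+2l], ... with l = k+1
def chunksFrom (cs : List Char) (k : Nat) (idx : Nat) : List (List Char) :=
  if idx < cs.length then (cs.drop idx).take (k+1) :: chunksFrom cs k (idx + (k+1)) else []
termination_by cs.length - idx
decreasing_by omega

def emitRun (c : List Char) (cnt : Int) : List Char :=
  c ++ (if cnt > 1 then PySem.Int.toChars cnt else [])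

-- run-length encoding of a chunk list, with the current run (c, cnt) open
def encodeC (c : List Char) (cnt : Int) : List (List Char) → List Char
  | [] => emitRun c cnt
  | c' :: r => if c' = c then encodeC c (cnt + 1) r else emitRun c cnt ++ encodeC c' 1 r

-- the j-th width-(k+1) chunk, and the number of chunks
def chunkAt (cs : List Char) (k j : Nat) : List Char := (cs.drop (j*(k+1))).take (k+1)

def mCh (cs : List Char) (k : Nat) : Nat := (cs.length + k) / (k+1)

def flagsFrom (cs : List Char) (k p q : Nat) : List Int :=
  (PySem.List.pyRange (p : Int) (q : Int) 1).filter (fun j => bFlag cs (cs.length : Int) ((k+1 : Nat) : Int) j)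

-- targeted unfoldings
theorem chunksFrom_pos (cs : List Char) (k idx : Nat) (h : idx < cs.length) :
    chunksFrom cs k idx = (cs.drop idx).take (k+1) :: chunksFrom cs k (idx + (k+1)) := by
  rw [chunksFrom, if_pos h]

theorem chunksFrom_neg (cs : List Char) (k idx : Nat) (h : ¬ idx < cs.length) :
    chunksFrom cs k idx = [] := by
  rw [chunksFrom, if_neg h]

theorem encodeC_nil (c : List Char) (cnt : Int) : encodeC c cnt [] = emitRun c cnt := rfl

theorem encodeC_cons (c : List Char) (cnt : Int) (c' : List Char) (r : List (List Char)) :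
    encodeC c cnt (c' :: r) = if c' = c then encodeC c (cnt + 1) r else emitRun c cnt ++ encodeC c' 1 r := rfl

-- A's while loop computes the run-length encoding of the chunks from idx on,
-- under the loop invariant pattern = s[idx:idx+l]
theorem aLoop_eq (cs : List Char) (k : Nat) :
    ∀ (m idx : Nat) (tmp : List Char) (cnt : Int), cs.length - idx ≤ m → idx + (k+1) ≤ cs.length →
      aLoop cs k ((cs.drop idx).take (k+1)) tmp cnt idx
        = tmp ++ encodeC ((cs.drop idx).take (k+1)) cnt (chunksFrom cs k (idx + (k+1))) := by
  intro m
  induction m with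
  | zero => intro idx tmp cnt hm hle; omega
  | succ m ih =>
    intro idx tmp cnt hm hle
    have hs1 : PySem.List.slice cs (some ((idx + (k+1) : Nat) : Int)) (some ((idx + (k+1) + (k+1) : Nat) : Int))
        = (cs.drop (idx + (k+1))).take (k+1) := by
      rw [PySem.List.slice_natCast]; congr 1; omega
    have hs0 : PySem.List.slice cs (some ((idx : Nat) : Int)) (some ((idx + (k+1) : Nat) : Int))
        = (cs.drop idx).take (k+1) := by
      rw [PySem.List.slice_natCast]; congr 1; omega
    rw [aLoop]
    simp only [hs1, hs0]
    by_cases heq : (cs.drop idx).take (k+1) = (cs.drop (idx + (k+1))).take (k+1)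
    · have hlen : idx + (k+1) + (k+1) ≤ cs.length := by
        have hl := congrArg List.length heq
        simp only [List.length_take, List.length_drop] at hl
        omega
      rw [if_pos heq, if_neg (show ¬ idx + (k+1) + (k+1) > cs.length by omega)]
      rw [heq, ih (idx + (k+1)) tmp (cnt + 1) (by omega) (by omega)]
      conv_rhs => rw [chunksFrom_pos cs k (idx + (k+1)) (by omega), encodeC_cons, if_pos rfl]
    · rw [if_neg heq]
      have hne' : ¬ ((cs.drop (idx + (k+1))).take (k+1) = (cs.drop idx).take (k+1)) :=
        fun hh => heq hh.symm
      by_cases hbr : idx + (k+1) + (k+1) > cs.length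
      · rw [if_pos hbr, if_neg (show ¬ ((1 : Int) > 1) by norm_num)]
        by_cases hin : idx + (k+1) < cs.length
        · conv_rhs => rw [chunksFrom_pos cs k (idx + (k+1)) hin, encodeC_cons, if_neg hne',
            chunksFrom_neg cs k (idx + (k+1) + (k+1)) (by omega), encodeC_nil]
          simp only [emitRun]
          rw [if_neg (show ¬ ((1 : Int) > 1) by norm_num)]
          split_ifs <;> simp [List.append_assoc]
        · have hnil : (cs.drop (idx + (k+1))).take (k+1) = [] := by
            rw [List.drop_eq_nil_of_le (Nat.le_of_not_lt hin)]; rfl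
          conv_rhs => rw [chunksFrom_neg cs k (idx + (k+1)) hin, encodeC_nil]
          rw [hnil]
          simp only [emitRun]
          split_ifs <;> simp [List.append_assoc]
      · rw [if_neg hbr]
        rw [ih (idx + (k+1)) _ 1 (by omega) (by omega)]
        conv_rhs => rw [chunksFrom_pos cs k (idx + (k+1)) (by omega), encodeC_cons, if_neg hne']
        simp only [emitRun]
        split_ifs <;> simp [List.append_assoc]

-- j < ceil(n / (k+1)) iff chunk j is nonempty
theorem lt_mCh_iff (cs : List Char) (k j : Nat) : j < mCh cs k ↔ j*(k+1) < cs.length := by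
  unfold mCh
  rw [show j < (cs.length + k) / (k+1) ↔ j + 1 ≤ (cs.length + k) / (k+1) from Iff.rfl,
    Nat.le_div_iff_mul_le (by omega), Nat.add_mul, Nat.one_mul]
  omega

theorem length_chunkAt (cs : List Char) (k j : Nat) :
    (chunkAt cs k j).length = min (k+1) (cs.length - j*(k+1)) := by
  simp [chunkAt]

-- chunk (j+1) equals chunk j iff chunk (j+1) is full width and the characters match at lag k+1
theorem chunk_eq_iff (cs : List Char) (k j : Nat) (h : (j+1)*(k+1) < cs.length) :
    chunkAt cs k (j+1) = chunkAt cs k j ↔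
      ((j+1)*(k+1) + (k+1) ≤ cs.length ∧
        ∀ t, t < k+1 → cs[(j+1)*(k+1)+t]? = cs[j*(k+1)+t]?) := by
  have hfull : (chunkAt cs k j).length = k+1 := by
    rw [length_chunkAt]; have : (j+1)*(k+1) = j*(k+1)+(k+1) := by ring
    omega
  have hget : ∀ (a t : Nat), t < k+1 → ((cs.drop a).take (k+1))[t]? = cs[a+t]? := by
    intro a t ht
    rw [List.getElem?_take_of_lt ht, List.getElem?_drop]
  constructor
  · intro he
    have hl : (chunkAt cs k (j+1)).length = k+1 := by rw [he, hfull]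
    rw [length_chunkAt] at hl
    have hfull2 : (j+1)*(k+1) + (k+1) ≤ cs.length := by omega
    refine ⟨hfull2, fun t ht => ?_⟩
    have := congrArg (fun xs => xs[t]?) he
    simpa [chunkAt, hget _ t ht] using this
  · rintro ⟨hfull2, hch⟩
    apply List.ext_getElem?
    intro t
    by_cases ht : t < k+1
    · simp only [chunkAt]
      rw [hget _ t ht, hget _ t ht, hch t ht]
    · have h1 : (chunkAt cs k (j+1)).length ≤ t := by rw [length_chunkAt]; omega
      have h2 : (chunkAt cs k j).length ≤ t := by rw [hfull]; omega
      rw [List.getElem?_eq_none h1, List.getElem?_eq_none h2]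

-- the any(...) over a natural range, in Nat form
theorem anyRange_iff (a L : Nat) (f : Int → Bool) :
    ((PySem.List.pyRange ((a : Nat) : Int) (((a : Nat) : Int) + ((L : Nat) : Int)) 1).any f = true) ↔
      ∃ t, t < L ∧ f ((a + t : Nat) : Int) = true := by
  rw [List.any_eq_true]
  constructor
  · rintro ⟨i, hmem, hf⟩
    rw [PySem.List.mem_pyRange_one] at hmem
    refine ⟨(i - a).toNat, by omega, ?_⟩
    have : ((a + (i - (a : Int)).toNat : Nat) : Int) = i := by push_cast; omega
    rw [this]; exact hf
  · rintro ⟨t, ht, hf⟩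
    exact ⟨((a + t : Nat) : Int), by rw [PySem.List.mem_pyRange_one]; push_cast; omega, hf⟩

-- B's filter predicate detects exactly the chunk boundaries
theorem bFlag_iff (cs : List Char) (k j : Nat) (h : (j+1)*(k+1) < cs.length) :
    (bFlag cs (cs.length : Int) ((k+1 : Nat) : Int) ((j+1 : Nat) : Int) = true) ↔
      chunkAt cs k (j+1) ≠ chunkAt cs k j := by
  rw [ne_eq, chunk_eq_iff cs k j h]
  unfold bFlag
  have hj0 : (((j+1 : Nat) : Int) == 0) = false := by
    rw [beq_eq_false_iff_ne]
    intro hh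
    omega
  have harg : ((j+1 : Nat) : Int) * ((k+1 : Nat) : Int) = (((j+1)*(k+1) : Nat) : Int) := by
    push_cast; ring
  rw [hj0]
  simp only [Bool.false_or, Bool.or_eq_true, decide_eq_true_eq, harg]
  constructor
  · rintro (hgt | hany)
    · intro ⟨hfull, _⟩
      have : (((j+1)*(k+1) + (k+1) : Nat) : Int) > (cs.length : Int) := by push_cast; push_cast at hgt; omega
      omega
    · rw [anyRange_iff] at hany
      obtain ⟨t, ht, hf⟩ := hany
      intro ⟨hfull, hch⟩
      have hi : (((j+1)*(k+1) + t : Nat) : Int) - ((k+1 : Nat) : Int) = ((j*(k+1) + t : Nat) : Int) := by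
        have : (j+1)*(k+1) = j*(k+1) + (k+1) := by ring
        push_cast [this]; ring
      rw [hi] at hf
      simp only [PySem.List.pyGet?_natCast, decide_eq_true_eq] at hf
      exact hf (hch t ht)
  · intro hne
    by_cases hfull : (j+1)*(k+1) + (k+1) ≤ cs.length
    · right
      rw [anyRange_iff]
      rw [not_and] at hne
      have hne2 := hne hfull
      rw [not_forall] at hne2
      obtain ⟨t, ht2⟩ := hne2
      rw [Classical.not_imp] at ht2
      obtain ⟨ht, hch⟩ := ht2
      refine ⟨t, ht, ?_⟩
      have hi : (((j+1)*(k+1) + t : Nat) : Int) - ((k+1 : Nat) : Int) = ((j*(k+1) + t : Nat) : Int) := by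
        have : (j+1)*(k+1) = j*(k+1) + (k+1) := by ring
        push_cast [this]; ring
      rw [hi]
      simp only [PySem.List.pyGet?_natCast, decide_eq_true_eq]
      exact hch
    · left
      omega

theorem bJoin_cons (cs : List Char) (l : Int) (x y : Int) (r : List Int) :
    bJoin cs l (x :: y :: r) = bPiece cs l (x, y) ++ bJoin cs l (y :: r) := by
  simp [bJoin]

-- a piece starting at chunk a covering b - a chunks is one emitted run
theorem bPiece_eq (cs : List Char) (k a : Nat) (b : Int) :
    bPiece cs ((k+1 : Nat) : Int) (((a : Nat) : Int), b)
      = emitRun (chunkAt cs k a) (b - ((a : Nat) : Int)) := by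
  unfold bPiece emitRun chunkAt
  have harg : ((a : Nat) : Int) * ((k+1 : Nat) : Int) = ((a*(k+1) : Nat) : Int) := by push_cast; ring
  rw [harg, PySem.List.slice_natCast_add]

-- main B lemma: from a position j inside the run that started at boundary a, the tail of the
-- bounds list together with the closing sentinel m joins to the run-length encoding
theorem bMain (cs : List Char) (k : Nat) :
    ∀ (d j a : Nat), a ≤ j → j*(k+1) < cs.length → cs.length - j*(k+1) ≤ d →
      chunkAt cs k j = chunkAt cs k a →
      bJoin cs ((k+1 : Nat) : Int)
          (((a : Nat) : Int) :: (flagsFrom cs k (j+1) (mCh cs k) ++ [((mCh cs k : Nat) : Int)]))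
        = encodeC (chunkAt cs k a) ((j : Int) - (a : Int) + 1) (chunksFrom cs k ((j+1)*(k+1))) := by
  intro d
  induction d with
  | zero => intro j a _ hj hd _; omega
  | succ d ih =>
    intro j a ha hj hd hrun
    by_cases hnext : (j+1)*(k+1) < cs.length
    · -- chunk j+1 exists
      have hsm : (j+1)*(k+1) = j*(k+1)+(k+1) := by ring
      have hjm : j + 1 < mCh cs k := (lt_mCh_iff cs k (j+1)).mpr hnext
      have hcons : PySem.List.pyRange ((j+1 : Nat) : Int) ((mCh cs k : Nat) : Int) 1
          = ((j+1 : Nat) : Int) :: PySem.List.pyRange ((j+2 : Nat) : Int) ((mCh cs k : Nat) : Int) 1 := by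
        have hcast : ((j+1 : Nat) : Int) + 1 = ((j+2 : Nat) : Int) := by push_cast; ring
        rw [PySem.List.pyRange_one_cons (by exact_mod_cast hjm), hcast]
      have hchunks : chunksFrom cs k ((j+1)*(k+1))
          = chunkAt cs k (j+1) :: chunksFrom cs k ((j+2)*(k+1)) := by
        rw [chunksFrom_pos cs k ((j+1)*(k+1)) hnext]
        have : (j+1)*(k+1) + (k+1) = (j+2)*(k+1) := by ring
        rw [this]; rfl
      rw [hchunks, encodeC_cons]
      by_cases heq : chunkAt cs k (j+1) = chunkAt cs k a
      · -- run continues: flag false, count grows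
        have hflag : bFlag cs (cs.length : Int) ((k+1 : Nat) : Int) ((j+1 : Nat) : Int) = false := by
          rw [Bool.eq_false_iff, Ne, bFlag_iff cs k j hnext]
          intro hne; exact hne (heq.trans hrun.symm)
        have hfil : flagsFrom cs k (j+1) (mCh cs k) = flagsFrom cs k (j+2) (mCh cs k) := by
          unfold flagsFrom
          rw [hcons, List.filter_cons_of_neg (by simp only [hflag]; exact Bool.false_ne_true)]
        rw [if_pos heq, hfil]
        have := ih (j+1) a (by omega) hnext (by omega) heq
        rw [this]
        congr 1
        push_cast; ring
      · -- boundary: flag true, emit the finished run and restart at j+1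
        have hflag : bFlag cs (cs.length : Int) ((k+1 : Nat) : Int) ((j+1 : Nat) : Int) = true := by
          rw [bFlag_iff cs k j hnext]
          intro he; exact heq (he.trans hrun)
        have hfil : flagsFrom cs k (j+1) (mCh cs k)
            = ((j+1 : Nat) : Int) :: flagsFrom cs k (j+2) (mCh cs k) := by
          unfold flagsFrom
          rw [hcons, List.filter_cons_of_pos (by simp only [hflag])]
        have hneq' : ¬ chunkAt cs k (j+1) = chunkAt cs k a := heq
        rw [if_neg hneq', hfil, List.cons_append, bJoin_cons, bPiece_eq]
        have hcnt : ((j+1 : Nat) : Int) - ((a : Nat) : Int) = (j : Int) - (a : Int) + 1 := by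
          push_cast; ring
        rw [hcnt]
        congr 1
        have := ih (j+1) (j+1) (le_refl _) hnext (by omega) rfl
        rw [this]
        norm_num
    · -- no chunk j+1: close the run with the sentinel m
      have hm : mCh cs k = j + 1 := by
        have h1 : j < mCh cs k := (lt_mCh_iff cs k j).mpr hj
        have h2 : ¬ (j + 1 < mCh cs k) := fun hh => hnext ((lt_mCh_iff cs k (j+1)).mp hh)
        omega
      have hfil : flagsFrom cs k (j+1) (mCh cs k) = [] := by
        unfold flagsFrom
        rw [hm, PySem.List.pyRange_one_eq_nil (by norm_num)]
        rfl
      rw [hfil, chunksFrom_neg cs k ((j+1)*(k+1)) hnext, encodeC_nil]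
      simp only [List.nil_append]
      have : bJoin cs ((k+1 : Nat) : Int) [((a : Nat) : Int), ((mCh cs k : Nat) : Int)]
          = bPiece cs ((k+1 : Nat) : Int) (((a : Nat) : Int), ((mCh cs k : Nat) : Int)) := by
        simp [bJoin]
      rw [this, bPiece_eq]
      congr 1
      rw [hm]; push_cast; ring

-- for one chunk width l = k+1 the two inner passes build the same candidate string
theorem innerEq (cs : List Char) (k : Nat) (h2 : 2*(k+1) ≤ cs.length) :
    aLoop cs k (PySem.List.slice cs none (some ((k+1 : Nat) : Int))) [] 1 0
      = bTmp cs (cs.length : Int) ((k+1 : Nat) : Int) := by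
  -- A side
  have hsl : PySem.List.slice cs none (some ((k+1 : Nat) : Int)) = (cs.drop 0).take (k+1) := by
    rw [PySem.List.slice_to_natCast, List.drop_zero]
  rw [hsl, aLoop_eq cs k cs.length 0 [] 1 (by omega) (by omega)]
  -- B side
  have hmint : PySem.Int.floordiv ((cs.length : Int) + ((k+1 : Nat) : Int) - 1) ((k+1 : Nat) : Int)
      = ((mCh cs k : Nat) : Int) := by
    have : (cs.length : Int) + ((k+1 : Nat) : Int) - 1 = ((cs.length + k : Nat) : Int) := by
      push_cast; ring
    rw [this]
    exact_mod_cast PySem.Int.floordiv_natCast (cs.length + k) (k+1)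
  have hm0 : 0 < mCh cs k := (lt_mCh_iff cs k 0).mpr (by omega)
  have hr0 : PySem.List.pyRange 0 ((mCh cs k : Nat) : Int) 1
      = 0 :: PySem.List.pyRange ((1 : Nat) : Int) ((mCh cs k : Nat) : Int) 1 := by
    rw [PySem.List.pyRange_one_cons (by exact_mod_cast hm0)]
    norm_num
  have hflag0 : bFlag cs (cs.length : Int) ((k+1 : Nat) : Int) 0 = true := by
    unfold bFlag; simp
  have hbt : bTmp cs (cs.length : Int) ((k+1 : Nat) : Int)
      = bJoin cs ((k+1 : Nat) : Int)
          ((0 : Int) :: (flagsFrom cs k 1 (mCh cs k) ++ [((mCh cs k : Nat) : Int)])) := by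
    unfold bTmp
    rw [hmint]
    simp only [hr0]
    rw [List.filter_cons_of_pos (by rw [hflag0])]
    rfl
  rw [hbt]
  have hb := bMain cs k cs.length 0 0 (le_refl 0) (by omega) (by omega) rfl
  simp only [Nat.cast_zero] at hb ⊢
  rw [hb]
  norm_num [chunkAt]

-- ===== VERDICT (by name: the statement is the Claim_ definition above) =====
theorem solution_spec : Claim_equal_solution := by
  intro s _hdom hpre
  show solution s = solution_alt s
  simp only [solution, solution_alt]
  rw [if_neg hpre, if_neg hpre]
  have hfold : ∀ (acc : Int × List Char) (l : Int),
      l ∈ PySem.List.pyRange 1 (PySem.Int.floordiv (s.toList.length : Int) 2 + 1) 1 →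
      (fun (acc : Int × List Char) l =>
        let tmp := aLoop s.toList (l.toNat - 1) (PySem.List.slice s.toList none (some l)) [] 1 0
        if acc.1 > (tmp.length : Int) then ((tmp.length : Int), tmp) else acc) acc l
      = (fun (acc : Int × List Char) l =>
        let tmp := bTmp s.toList (s.toList.length : Int) l
        if (tmp.length : Int) < acc.1 then ((tmp.length : Int), tmp) else acc) acc l := by
    intro acc l hl
    rw [PySem.List.mem_pyRange_one] at hl
    have hfd : PySem.Int.floordiv ((s.toList.length : Nat) : Int) 2 = ((s.toList.length / 2 : Nat) : Int) := by
      exact_mod_cast PySem.Int.floordiv_natCast s.toList.length 2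
    rw [hfd] at hl
    obtain ⟨k, hk⟩ : ∃ k : Nat, l = ((k+1 : Nat) : Int) := ⟨l.toNat - 1, by omega⟩
    have h2 : 2*(k+1) ≤ s.toList.length := by omega
    subst hk
    simp only [Int.toNat_natCast, Nat.add_sub_cancel]
    rw [innerEq s.toList k h2]
  rw [PySem.List.foldl_congr_mem _ _ _ _ hfold]
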